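-- pv_equiv track=rewrite | github.com/ahenshaw/aoc2020 | aoc19/solver2.py | make_single
-- ===== SOURCE A (Python) =====
-- def make_single(group):
--     parens = 0
--     code = '    return '
--     for c in reversed(group.split()):
--         code += f'p{c}('
--         parens += 1
--     code += 'x'+')'*parens
--     return code
-- ===== SOURCE B (Python) =====
-- def make_single(group):
--     expr = 'x'
--     for c in group.split():
--         expr = f'p{c}({expr})'
--     return '    return ' + expr
-- ===== Notes on version B (the rewrite author's own statement) =====
-- stated objective: simpler
-- what changed: B folds forward over the tokens maintaining the complete nested call expression as its accumulator, instead of A's reversed iteration that accumulates an open-call prefix plus a parenthesis counter closed at the end.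
import Mathlib
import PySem

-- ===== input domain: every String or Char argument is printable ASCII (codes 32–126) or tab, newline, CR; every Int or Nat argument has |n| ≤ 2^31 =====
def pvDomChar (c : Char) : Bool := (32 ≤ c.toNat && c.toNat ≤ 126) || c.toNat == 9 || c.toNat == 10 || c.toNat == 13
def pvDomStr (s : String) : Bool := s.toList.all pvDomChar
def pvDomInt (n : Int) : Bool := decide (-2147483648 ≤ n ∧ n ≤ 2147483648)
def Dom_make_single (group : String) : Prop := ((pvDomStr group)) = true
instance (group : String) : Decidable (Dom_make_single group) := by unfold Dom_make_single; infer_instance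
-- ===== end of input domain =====

-- ===== PORT A =====
-- B changes: forward fold keeping the whole nested call expression, vs A's reversed pass with a prefix and a paren counter (objective: simpler).
-- A's `parens` only ever counts up from 0, ported as a Nat counter; ')'*parens is String.ofList (List.replicate parens ')').
def make_single (group : String) : String :=
  let st := (PySem.Str.split₀ group).reverse.foldl
    (fun (s : String × Nat) c => (s.1 ++ ("p" ++ c ++ "("), s.2 + 1)) ("    return ", 0)
  st.1 ++ ("x" ++ String.ofList (List.replicate st.2 ')'))

-- ===== PORT B =====
def make_single_alt (group : String) : String :=
  "    return " ++ (PySem.Str.split₀ group).foldl (fun expr c => "p" ++ c ++ "(" ++ expr ++ ")") "x"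

-- ===== PRECONDITION & SPEC =====
def Spec_make_single (group : String) (out : String) : Prop := out = make_single_alt group
instance (group : String) (out : String) : Decidable (Spec_make_single group out) := by unfold Spec_make_single; infer_instance

-- ===== CLAIM (what is proved, stated in full; the proofs are below) =====
def Claim_equal_make_single : Prop := ∀ (group : String), Dom_make_single group → Spec_make_single group (make_single group)

-- ===== LEMMAS AND PROOFS =====

theorem ofList_cons_closer (c : Char) (l : List Char) :
    String.ofList (c :: l) = String.singleton c ++ String.ofList l := by
  apply String.toList_injective; simp

theorem make_single_key (ts : List String) (pre e : String) (n : Nat) :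
    (ts.reverse.foldl
        (fun (s : String × Nat) c => (s.1 ++ ("p" ++ c ++ "("), s.2 + 1)) (pre, n)).1
      ++ (e ++ String.ofList (List.replicate
        (ts.reverse.foldl
          (fun (s : String × Nat) c => (s.1 ++ ("p" ++ c ++ "("), s.2 + 1)) (pre, n)).2 ')'))
    = pre ++ (ts.foldl (fun expr c => "p" ++ c ++ "(" ++ expr ++ ")") e
        ++ String.ofList (List.replicate n ')')) := by
  induction ts generalizing e with
  | nil => simp
  | cons t ts ih =>
    simp only [List.reverse_cons, List.foldl_append, List.foldl_cons, List.foldl_nil,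
      List.replicate_succ]
    rw [← ih ("p" ++ t ++ "(" ++ e ++ ")")]
    simp [ofList_cons_closer, ← String.append_assoc]
    apply String.toList_injective
    simp

-- ===== VERDICT (by name: the statement is the Claim_ definition above) =====
theorem make_single_spec : Claim_equal_make_single := by
  intro group _
  unfold Spec_make_single make_single make_single_alt
  simpa using make_single_key (PySem.Str.split₀ group) "    return " "x" 0
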